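-- pv_equiv track=rewrite | github.com/kyoungbinkim/algorithmStudy | 1208.py | calc
-- ===== SOURCE A (Python) =====
-- def calc(nlist):
--     ansMap = {}
--     for num in nlist:
--         # tmp = ansMap.copy()
--         updateList = []
--         for k in ansMap.keys():
--             if ansMap.get(k) == None:
--                 updateList.append([k+num, 1])
--             else:
--                 updateList.append([k+num, ansMap[k]])
--
--         for update in updateList:
--             if ansMap.get(update[0]) == None:
--                 ansMap.update({update[0] : update[1]})
--             else:
--                 ansMap[update[0]] += update[1]
--
--         if ansMap.get(num) == None:
--             ansMap.update({num : 1})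
--         else:
--             ansMap[num] += 1
--     return ansMap
-- ===== SOURCE B (Python) =====
-- def calc(nlist):
--     # Build the flat list of all non-empty subset sums (each new element
--     # extends every earlier subset and starts its own), then count in one pass.
--     sums = []
--     for x in nlist:
--         sums += [s + x for s in sums] + [x]
--     ansMap = {}
--     for s in sums:
--         ansMap[s] = ansMap.get(s, 0) + 1
--     return ansMap
-- ===== Notes on version B (the rewrite author's own statement) =====
-- stated objective: simpler
-- what changed: B drops A's per-element two-phase dict merge (snapshot keys into updateList, merge shifted entries back, then count the element) and instead generates the flat list of all non-empty subset sums with one list fold, then counts that list into a dict in a single pass.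
import Mathlib
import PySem

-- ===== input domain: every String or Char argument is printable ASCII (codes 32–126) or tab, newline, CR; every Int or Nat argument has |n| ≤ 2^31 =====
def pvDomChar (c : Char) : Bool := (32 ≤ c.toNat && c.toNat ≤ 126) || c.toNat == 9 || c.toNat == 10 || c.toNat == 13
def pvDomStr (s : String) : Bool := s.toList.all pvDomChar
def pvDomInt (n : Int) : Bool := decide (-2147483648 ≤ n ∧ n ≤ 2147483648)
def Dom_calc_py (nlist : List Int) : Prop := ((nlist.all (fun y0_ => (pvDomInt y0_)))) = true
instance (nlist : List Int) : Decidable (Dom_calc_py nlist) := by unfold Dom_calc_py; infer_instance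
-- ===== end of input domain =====

-- B replaces A's per-element two-phase dict merge by generating the flat list of all
-- non-empty subset sums and counting it in one pass (objective: simpler; not faster).

-- ===== PORT A =====
-- one iteration of A's outer 'for num in nlist' loop, step for step
-- (ansMap[k] / ansMap[u0] += u1 are ported via getD/modify with default 0: the
-- guarding branch has just checked that the key is present, so they are exact)
def calc_py_step (ansMap : PySem.Dict Int Int) (num : Int) : PySem.Dict Int Int :=
  -- for k in ansMap.keys(): build updateList
  let updateList : List (Int × Int) := ansMap.keys.map (fun k =>
    if ansMap.get? k = none then (k + num, 1) else (k + num, ansMap.getD k 0))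
  -- for update in updateList: merge into ansMap
  let d1 := updateList.foldl (fun d u =>
    if d.get? u.1 = none then d.insert u.1 u.2 else d.modify u.1 0 (· + u.2)) ansMap
  -- finally count num itself
  if d1.get? num = none then d1.insert num 1 else d1.modify num 0 (· + 1)

def calc_py (nlist : List Int) : List (Int × Int) :=
  (nlist.foldl calc_py_step PySem.Dict.empty).items

-- ===== PORT B =====
def calc_py_alt (nlist : List Int) : List (Int × Int) :=
  -- sums += [s + x for s in sums] + [x]
  let sums := nlist.foldl (fun acc x => acc ++ (acc.map (· + x) ++ [x])) []
  -- ansMap[s] = ansMap.get(s, 0) + 1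
  (sums.foldl (fun d s => d.insert s (d.getD s 0 + 1)) PySem.Dict.empty).items

-- ===== PRECONDITION & SPEC =====
def Spec_calc_py (nlist : List Int) (out : List (Int × Int)) : Prop := out = calc_py_alt nlist
instance (nlist : List Int) (out : List (Int × Int)) : Decidable (Spec_calc_py nlist out) := by unfold Spec_calc_py; infer_instance

-- ===== CLAIM (what is proved, stated in full; the proofs are below) =====
def Claim_equal_calc_py : Prop := ∀ (nlist : List Int), Dom_calc_py nlist → Spec_calc_py nlist (calc_py nlist)

-- ===== LEMMAS AND PROOFS =====

-- A's 'insert-or-+=' branch is exactly Dict.modify with default 0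
lemma calcpy_ite_eq_modify (d : PySem.Dict Int Int) (k v : Int) :
    (if d.get? k = none then d.insert k v else d.modify k 0 (· + v))
      = d.modify k 0 (· + v) := by
  by_cases h : d.get? k = none
  · rw [if_pos h]
    show d.insert k v = d.insert k (d.getD k 0 + v)
    rw [PySem.Dict.getD_of_get?_eq_none _ _ h, zero_add]
  · rw [if_neg h]

lemma addx_injective (x : Int) : Function.Injective (· + x : Int → Int) := by
  intro a b h
  simp only at h
  omega

lemma ofList_map_add (S : List Int) (x : Int) :
    PySem.Set.ofList (S.map (· + x)) = (PySem.Set.ofList S).map (· + x) := by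
  induction S using List.reverseRecOn with
  | nil => rfl
  | append_singleton S a ih =>
      rw [List.map_append, List.map_singleton, PySem.Set.ofList_append_singleton,
        PySem.Set.ofList_append_singleton, ih, PySem.Set.add_eq_ite, PySem.Set.add_eq_ite]
      have hmem : (a + x) ∈ (PySem.Set.ofList S).map (· + x) ↔ a ∈ PySem.Set.ofList S := by
        constructor
        · rintro hm
          obtain ⟨b, hb, hba⟩ := List.mem_map.mp hm
          have hba' : b = a := addx_injective x hba
          exact hba' ▸ hb
        · intro h
          exact List.mem_map.mpr ⟨a, h, rfl⟩
      by_cases h : a ∈ PySem.Set.ofList S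
      · rw [if_pos (hmem.mpr h), if_pos h]
      · rw [if_neg (fun hc => h (hmem.mp hc)), if_neg h, List.map_append, List.map_singleton]

lemma sum_filter_pairs (y x : Int) (g : Int → Int) :
    ∀ (K : List Int), K.Nodup →
      (((K.map (fun k => (k + x, g k))).filter (fun u => u.1 == y)).map (fun u => u.2)).sum
        = if y - x ∈ K then g (y - x) else 0 := by
  intro K
  induction K with
  | nil => intro _; simp
  | cons k K ih =>
      intro hnd
      rw [List.nodup_cons] at hnd
      rw [List.map_cons, List.filter_cons]
      by_cases hk : k + x = y
      · have hky : k = y - x := by omega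
        have hnm : y - x ∉ K := hky ▸ hnd.1
        rw [if_pos (by simp [hk]), List.map_cons, List.sum_cons, ih hnd.2, if_neg hnm,
          if_pos (List.mem_cons.mpr (Or.inl hky.symm))]
        simp [hky]
      · rw [if_neg (by simp [hk]), ih hnd.2]
        have hiff : (y - x ∈ k :: K) ↔ (y - x ∈ K) := by
          simp only [List.mem_cons, or_iff_right_iff_imp]
          intro h; omega
        by_cases hm : y - x ∈ K
        · rw [if_pos hm, if_pos (hiff.mpr hm)]
        · rw [if_neg hm, if_neg (fun hc => hm (hiff.mp hc))]

lemma getD_foldl_modify_pairs :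
    ∀ (ps : List (Int × Int)) (d : PySem.Dict Int Int) (y : Int),
      (ps.foldl (fun d u => d.modify u.1 0 (· + u.2)) d).getD y 0
        = d.getD y 0 + (((ps.filter (fun u => u.1 == y))).map (fun u => u.2)).sum := by
  intro ps
  induction ps with
  | nil => intro d y; simp
  | cons u ps ih =>
      intro d y
      rw [List.foldl_cons, ih, List.filter_cons]
      by_cases h : u.1 = y
      · rw [if_pos (by simp [h]), List.map_cons, List.sum_cons,
          PySem.Dict.getD_modify, if_pos h.symm, h]
        ring
      · rw [if_neg (by simp [h]), PySem.Dict.getD_modify, if_neg (fun hc => h hc.symm)]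

lemma count_map_add (S : List Int) (x y : Int) :
    (S.map (· + x)).count y = S.count (y - x) := by
  have h := List.count_map_of_injective S (· + x) (addx_injective x) (y - x)
  rw [show y - x + x = y from by ring] at h
  exact h

-- the heart: A's merge pass over the grouped items equals B's counting pass over the raw sums
lemma merge_eq_count (S : List Int) (x : Int) :
    ((PySem.Set.ofList S).map (fun k => (k + x, (S.count k : Int)))).foldl
        (fun d u => d.modify u.1 0 (· + u.2)) (PySem.Dict.counter S)
      = (S.map (· + x)).foldl (fun d y => d.modify y 0 (· + 1)) (PySem.Dict.counter S) := by
  set K := PySem.Set.ofList S with hK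
  have hKnd : K.Nodup := PySem.Set.nodup_ofList S
  have hdk : (PySem.Dict.counter S).keys = K := PySem.Dict.keys_counter S
  have hdnd : (PySem.Dict.counter S).keys.Nodup := PySem.Dict.nodup_keys_counter S
  have hkeysL := PySem.Dict.keys_foldl_modify_key
    (K.map (fun k => (k + x, (S.count k : Int)))) (fun u => u.1) 0
    (fun (_ : PySem.Dict Int Int) (u : Int × Int) => (· + u.2)) (PySem.Dict.counter S)
  have hkeysR := PySem.Dict.keys_foldl_modify_key
    (S.map (· + x)) (fun y => y) 0 (fun (_ : PySem.Dict Int Int) (_ : Int) => (· + (1:Int))) (PySem.Dict.counter S)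
  have hmaps : (K.map (fun k => (k + x, (S.count k : Int)))).map (fun u => u.1)
      = K.map (· + x) := by
    rw [List.map_map]; rfl
  have hofl : PySem.Set.ofList (K.map (· + x)) = PySem.Set.ofList (S.map (· + x)) := by
    rw [ofList_map_add, ofList_map_add, hK, PySem.Set.ofList_ofList]
  have hkeys :
      ((K.map (fun k => (k + x, (S.count k : Int)))).foldl
          (fun d u => d.modify u.1 0 (· + u.2)) (PySem.Dict.counter S)).keys
        = ((S.map (· + x)).foldl (fun d y => d.modify y 0 (· + 1))
            (PySem.Dict.counter S)).keys := by
    rw [hkeysL, hkeysR, hmaps, List.map_id', hdk,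
      PySem.Set.update_eq_append_filter, PySem.Set.update_eq_append_filter, hofl]
  have hndL : ((K.map (fun k => (k + x, (S.count k : Int)))).foldl
      (fun d u => d.modify u.1 0 (· + u.2)) (PySem.Dict.counter S)).keys.Nodup :=
    PySem.Dict.nodup_keys_foldl_modify_key _ (fun u => u.1) 0 (fun (_ : PySem.Dict Int Int) (u : Int × Int) => (· + u.2)) _ hdnd
  have hndR : ((S.map (· + x)).foldl (fun d y => d.modify y 0 (· + 1))
      (PySem.Dict.counter S)).keys.Nodup :=
    PySem.Dict.nodup_keys_foldl_modify_key _ (fun y => y) 0 (fun (_ : PySem.Dict Int Int) (_ : Int) => (· + (1:Int))) _ hdnd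
  have hgetD : ∀ y : Int,
      ((K.map (fun k => (k + x, (S.count k : Int)))).foldl
          (fun d u => d.modify u.1 0 (· + u.2)) (PySem.Dict.counter S)).getD y 0
        = ((S.map (· + x)).foldl (fun d y => d.modify y 0 (· + 1))
            (PySem.Dict.counter S)).getD y 0 := by
    intro y
    rw [getD_foldl_modify_pairs, PySem.Dict.getD_foldl_modify_add_one,
      sum_filter_pairs y x (fun k => (S.count k : Int)) K hKnd, count_map_add]
    congr 1
    by_cases hm : y - x ∈ K
    · rw [if_pos hm]
    · rw [if_neg hm]
      have hns : y - x ∉ S := fun hc => hm ((PySem.Set.mem_ofList _ _).mpr hc)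
      rw [List.count_eq_zero_of_not_mem hns]
      rfl
  apply PySem.Dict.ext
  rw [PySem.Dict.items_eq_map_keys _ hndL 0, PySem.Dict.items_eq_map_keys _ hndR 0, hkeys]
  exact List.map_congr_left (fun k _ => by rw [hgetD k])

-- one step of A on a counter dict extends the counted multiset the way B's sums list grows
lemma calc_py_step_counter (S : List Int) (x : Int) :
    calc_py_step (PySem.Dict.counter S) x
      = PySem.Dict.counter (S ++ (S.map (· + x) ++ [x])) := by
  have hcapp : ∀ (S T : List Int), PySem.Dict.counter (S ++ T)
      = T.foldl (fun d y => d.modify y 0 (· + 1)) (PySem.Dict.counter S) := by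
    intro S T
    rw [PySem.Dict.counter_eq_foldl, PySem.Dict.counter_eq_foldl, List.foldl_append]
  have hupd : (PySem.Dict.counter S).keys.map (fun k =>
        if (PySem.Dict.counter S).get? k = none then (k + x, (1 : Int))
        else (k + x, (PySem.Dict.counter S).getD k 0))
      = (PySem.Set.ofList S).map (fun k => (k + x, (S.count k : Int))) := by
    rw [PySem.Dict.keys_counter]
    refine List.map_congr_left (fun k hk => ?_)
    have hk' : k ∈ (PySem.Dict.counter S).keys := by rw [PySem.Dict.keys_counter]; exact hk
    have hne : ¬ (PySem.Dict.counter S).get? k = none := by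
      intro h
      exact absurd hk' ((PySem.Dict.get?_eq_none_iff_not_mem_keys _ _).mp h)
    rw [if_neg hne, PySem.Dict.getD_counter]
  have hmerge : ∀ (ps : List (Int × Int)) (d : PySem.Dict Int Int),
      ps.foldl (fun d u =>
        if d.get? u.1 = none then d.insert u.1 u.2 else d.modify u.1 0 (· + u.2)) d
      = ps.foldl (fun d u => d.modify u.1 0 (· + u.2)) d := by
    intro ps d
    exact PySem.List.foldl_congr_mem ps _ _ d
      (fun d' u _ => calcpy_ite_eq_modify d' u.1 u.2)
  rw [hcapp, List.foldl_append]
  unfold calc_py_step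
  dsimp only
  rw [hupd, hmerge, merge_eq_count, calcpy_ite_eq_modify]
  simp only [List.foldl_cons, List.foldl_nil]

lemma calc_py_foldl_eq_counter (l : List Int) :
    l.foldl calc_py_step PySem.Dict.empty
      = PySem.Dict.counter (l.foldl (fun acc x => acc ++ (acc.map (· + x) ++ [x])) []) := by
  induction l using List.reverseRecOn with
  | nil => rfl
  | append_singleton l x ih =>
      rw [List.foldl_append, List.foldl_append, ih]
      simp only [List.foldl_cons, List.foldl_nil]
      rw [calc_py_step_counter]

-- ===== VERDICT (by name: the statement is the Claim_ definition above) =====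
theorem calc_py_spec : Claim_equal_calc_py := by
  intro nlist _
  show calc_py nlist = calc_py_alt nlist
  simp only [calc_py, calc_py_alt]
  rw [calc_py_foldl_eq_counter, PySem.Dict.foldl_insert_getD_add_one_eq_counter]
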